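-- pv_equiv track=rewrite | github.com/jpedro-fsgs/desafio-nlp | backend/scripts/check_missing_links.py | infer_metadata
-- ===== SOURCE A (Python) =====
-- SIGLA_MAP = {
--     "ren": ("REN", "Resolução Normativa"),
--     "dsp": ("DSP", "Despacho"),
--     "rea": ("REA", "Resolução Autorizativa"),
--     "prt": ("PRT", "Portaria"),
--     "reh": ("REH", "Resolução Homologatória"),
--     "ina": ("INA", "Instrução Normativa"),
--     "aaap": ("AAAP", "Ato Administrativo"),
--     "adsp": ("ADSP", "Anexo de Despacho"),
--     "area": ("AREA", "Anexo de Resolução Autorizativa"),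
--     "aprt": ("APRT", "Anexo de Portaria"),
--     "areh": ("AREH", "Anexo de Resolução Homologatória"),
-- }
--
-- def infer_metadata(filename: str):
--     filename = filename.lower()
--     sigla, natureza = "OUTRO", "Documento"
--     for prefix, (s, n) in SIGLA_MAP.items():
--         if filename.startswith(prefix):
--             sigla, natureza = s, n
--             break
--     return sigla, natureza
-- ===== SOURCE B (Python) =====
-- SIGLA_MAP = {
--     "ren": ("REN", "Resolução Normativa"),
--     "dsp": ("DSP", "Despacho"),
--     "rea": ("REA", "Resolução Autorizativa"),
--     "prt": ("PRT", "Portaria"),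
--     "reh": ("REH", "Resolução Homologatória"),
--     "ina": ("INA", "Instrução Normativa"),
--     "aaap": ("AAAP", "Ato Administrativo"),
--     "adsp": ("ADSP", "Anexo de Despacho"),
--     "area": ("AREA", "Anexo de Resolução Autorizativa"),
--     "aprt": ("APRT", "Anexo de Portaria"),
--     "areh": ("AREH", "Anexo de Resolução Homologatória"),
-- }
--
-- def infer_metadata(filename: str):
--     f = filename.lower()
--     return SIGLA_MAP.get(f[:4]) or SIGLA_MAP.get(f[:3]) or ("OUTRO", "Documento")
-- ===== Notes on version B (the rewrite author's own statement) =====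
-- stated objective: idiomatic
-- what changed: A scans all eleven SIGLA_MAP entries with startswith and break; B exploits that every key has length 3 or 4 and does two direct dict lookups keyed on the lowered filename's first-4 and first-3 character slices, with no loop over the entries.
import Mathlib
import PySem

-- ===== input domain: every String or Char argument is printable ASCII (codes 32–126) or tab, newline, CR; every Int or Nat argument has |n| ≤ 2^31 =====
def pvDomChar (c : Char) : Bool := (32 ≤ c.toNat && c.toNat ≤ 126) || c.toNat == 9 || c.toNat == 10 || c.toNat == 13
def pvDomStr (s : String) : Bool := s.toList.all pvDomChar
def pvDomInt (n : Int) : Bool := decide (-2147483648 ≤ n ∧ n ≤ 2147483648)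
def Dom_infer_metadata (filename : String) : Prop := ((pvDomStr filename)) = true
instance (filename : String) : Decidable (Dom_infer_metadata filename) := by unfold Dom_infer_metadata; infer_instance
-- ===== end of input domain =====

-- B replaces A's linear scan over the eleven SIGLA_MAP entries with two direct dict
-- lookups keyed on the lowered filename's first-4 and first-3 character slices (idiomatic).

-- ===== PORT A =====
-- SIGLA_MAP as the list of (prefix, sigla, natureza) entries A's for-loop iterates (insertion order)
def siglaEntriesA : List (String × String × String) :=
  [("ren", "REN", "Resolução Normativa"),
   ("dsp", "DSP", "Despacho"),
   ("rea", "REA", "Resolução Autorizativa"),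
   ("prt", "PRT", "Portaria"),
   ("reh", "REH", "Resolução Homologatória"),
   ("ina", "INA", "Instrução Normativa"),
   ("aaap", "AAAP", "Ato Administrativo"),
   ("adsp", "ADSP", "Anexo de Despacho"),
   ("area", "AREA", "Anexo de Resolução Autorizativa"),
   ("aprt", "APRT", "Anexo de Portaria"),
   ("areh", "AREH", "Anexo de Resolução Homologatória")]

-- the for-loop with break: the first matching prefix wins, else the initial ("OUTRO", "Documento")
def inferLoopA (f : String) : List (String × String × String) → String × String
  | [] => ("OUTRO", "Documento")
  | (prefix_, s, n) :: rest =>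
      if PySem.Str.startswith f prefix_ then (s, n) else inferLoopA f rest

def infer_metadata (filename : String) : String × String :=
  inferLoopA (PySem.Str.lower filename) siglaEntriesA

-- ===== PORT B =====
def SIGLA_MAP_B : PySem.Dict String (String × String) :=
  PySem.Dict.ofList
    [("ren", ("REN", "Resolução Normativa")),
     ("dsp", ("DSP", "Despacho")),
     ("rea", ("REA", "Resolução Autorizativa")),
     ("prt", ("PRT", "Portaria")),
     ("reh", ("REH", "Resolução Homologatória")),
     ("ina", ("INA", "Instrução Normativa")),
     ("aaap", ("AAAP", "Ato Administrativo")),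
     ("adsp", ("ADSP", "Anexo de Despacho")),
     ("area", ("AREA", "Anexo de Resolução Autorizativa")),
     ("aprt", ("APRT", "Anexo de Portaria")),
     ("areh", ("AREH", "Anexo de Resolução Homologatória"))]

-- Source B: SIGLA_MAP.get(f[:4]) or SIGLA_MAP.get(f[:3]) or ("OUTRO", "Documento")
-- (the dict values are non-empty tuples, hence truthy: 'or' on them is Option.or/getD)
def infer_metadata_alt (filename : String) : String × String :=
  let f := PySem.Str.lower filename
  (((SIGLA_MAP_B.get? (PySem.Str.slice f none (some 4))).or
    (SIGLA_MAP_B.get? (PySem.Str.slice f none (some 3)))).getD ("OUTRO", "Documento"))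

-- ===== PRECONDITION & SPEC =====
def Spec_infer_metadata (filename : String) (out : String × String) : Prop := out = infer_metadata_alt filename
instance (filename : String) (out : String × String) : Decidable (Spec_infer_metadata filename out) := by unfold Spec_infer_metadata; infer_instance

-- ===== CLAIM (what is proved, stated in full; the proofs are below) =====
def Claim_equal_infer_metadata : Prop := ∀ (filename : String), Dom_infer_metadata filename → Spec_infer_metadata filename (infer_metadata filename)

-- ===== LEMMAS AND PROOFS =====

-- literal dict key k (with toList cs) compared with an arbitrary string: BEq String on the list side
theorem beq_keyl (k s : String) (cs : List Char) (h : k.toList = cs) :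
    (k == s) = decide (s.toList = cs) := by
  subst h
  by_cases he : k = s
  · subst he; simp
  · have h2 : ¬ s.toList = k.toList := fun hl => he (String.ext (by simpa using hl.symm))
    simp [he, h2]

-- startswith against a literal prefix is an equation on the take of its length
theorem swl (g p : String) (cs : List Char) (h : p.toList = cs) :
    PySem.Str.startswith g p = decide (g.toList.take cs.length = cs) := by
  subst h
  rw [PySem.Str.startswith_eq, Bool.eq_iff_iff, PySem.Chars.startswith_iff,
    decide_eq_true_eq, List.prefix_iff_eq_take]
  exact eq_comm

-- core: for every string g, A's scan equals B's two slice lookups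
set_option maxHeartbeats 2000000 in
theorem core (g : String) :
    inferLoopA g siglaEntriesA =
      (((SIGLA_MAP_B.get? (PySem.Str.slice g none (some 4))).or
        (SIGLA_MAP_B.get? (PySem.Str.slice g none (some 3)))).getD ("OUTRO", "Documento")) := by
  have hm : SIGLA_MAP_B = PySem.Dict.mk
    [("ren", ("REN", "Resolução Normativa")),
     ("dsp", ("DSP", "Despacho")),
     ("rea", ("REA", "Resolução Autorizativa")),
     ("prt", ("PRT", "Portaria")),
     ("reh", ("REH", "Resolução Homologatória")),
     ("ina", ("INA", "Instrução Normativa")),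
     ("aaap", ("AAAP", "Ato Administrativo")),
     ("adsp", ("ADSP", "Anexo de Despacho")),
     ("area", ("AREA", "Anexo de Resolução Autorizativa")),
     ("aprt", ("APRT", "Anexo de Portaria")),
     ("areh", ("AREH", "Anexo de Resolução Homologatória"))] := by decide
  have h4 : (PySem.Str.slice g none (some 4)).toList = g.toList.take 4 := by
    rw [PySem.Str.toList_slice, PySem.Chars.slice_eq_listSlice,
      PySem.List.slice_to _ (by norm_num)]; rfl
  have h3 : (PySem.Str.slice g none (some 3)).toList = g.toList.take 3 := by
    rw [PySem.Str.toList_slice, PySem.Chars.slice_eq_listSlice,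
      PySem.List.slice_to _ (by norm_num)]; rfl
  have ht : List.take 3 g.toList = List.take 3 (List.take 4 g.toList) := by
    rw [List.take_take]; norm_num
  simp only [siglaEntriesA, inferLoopA, hm, PySem.Dict.get?_mk_cons,
    swl g "ren" ['r','e','n'] (by decide), swl g "dsp" ['d','s','p'] (by decide),
    swl g "rea" ['r','e','a'] (by decide), swl g "prt" ['p','r','t'] (by decide),
    swl g "reh" ['r','e','h'] (by decide), swl g "ina" ['i','n','a'] (by decide),
    swl g "aaap" ['a','a','a','p'] (by decide), swl g "adsp" ['a','d','s','p'] (by decide),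
    swl g "area" ['a','r','e','a'] (by decide), swl g "aprt" ['a','p','r','t'] (by decide),
    swl g "areh" ['a','r','e','h'] (by decide),
    beq_keyl "ren" _ ['r','e','n'] (by decide), beq_keyl "dsp" _ ['d','s','p'] (by decide),
    beq_keyl "rea" _ ['r','e','a'] (by decide), beq_keyl "prt" _ ['p','r','t'] (by decide),
    beq_keyl "reh" _ ['r','e','h'] (by decide), beq_keyl "ina" _ ['i','n','a'] (by decide),
    beq_keyl "aaap" _ ['a','a','a','p'] (by decide), beq_keyl "adsp" _ ['a','d','s','p'] (by decide),
    beq_keyl "area" _ ['a','r','e','a'] (by decide), beq_keyl "aprt" _ ['a','p','r','t'] (by decide),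
    beq_keyl "areh" _ ['a','r','e','h'] (by decide),
    h4, h3, List.length_cons, List.length_nil, Nat.reduceAdd]
  have hnone : ({ items := [] } : PySem.Dict String (String × String)).get?
      (PySem.Str.slice g none (some 4)) = none := rfl
  have hnone3 : ({ items := [] } : PySem.Dict String (String × String)).get?
      (PySem.Str.slice g none (some 3)) = none := rfl
  rw [hnone, hnone3]; simp only [ht]
  obtain ⟨t4, h⟩ : ∃ t4, List.take 4 g.toList = t4 := ⟨_, rfl⟩
  simp only [h]
  rcases t4 with _ | ⟨c1, _ | ⟨c2, _ | ⟨c3, _ | ⟨c4, rest⟩⟩⟩⟩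
  case nil => simp
  case cons.nil => simp
  case cons.cons.nil => simp
  case cons.cons.cons.nil => simp; split_ifs <;> simp_all
  case cons.cons.cons.cons =>
    obtain rfl : rest = [] := by
      have hl := congrArg List.length h
      simp only [List.length_take, List.length_cons] at hl
      have : rest.length = 0 := by omega
      exact List.eq_nil_of_length_eq_zero this
    simp
    split_ifs <;> simp_all

-- ===== VERDICT (by name: the statement is the Claim_ definition above) =====
theorem infer_metadata_spec : Claim_equal_infer_metadata := by
  intro filename _
  unfold Spec_infer_metadata infer_metadata infer_metadata_alt
  exact core (PySem.Str.lower filename)
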